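-- pv_equiv track=rewrite | github.com/quveta21/Portfolio | University Projects/Python (Programming Fundamentals)/sortari_examen/sort.py | divideEtImperaProdus
-- ===== SOURCE A (Python) =====
-- def divideEtImperaProdus(lista, st, dr):
--     if st == dr and st % 2 == 0:
--         return lista[st]
--     else:
--         if st < dr:
--             mij = (st+dr)//2
--             left = divideEtImperaProdus(lista, st, mij)
--             right = divideEtImperaProdus(lista, mij+1, dr)
--             return left * right
--         else:
--             return 1
-- ===== SOURCE B (Python) =====
-- def divideEtImperaProdus(lista, st, dr):
--     prod = 1
--     for i in range(st, dr + 1):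
--         if i % 2 == 0:
--             prod *= lista[i]
--     return prod
-- ===== Notes on version B (the rewrite author's own statement) =====
-- stated objective: simpler
-- what changed: Replaces the divide-and-conquer recursion that splits [st,dr] at the midpoint with a single direct loop over range(st, dr+1) multiplying the even-indexed elements into an accumulator.
import Mathlib
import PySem

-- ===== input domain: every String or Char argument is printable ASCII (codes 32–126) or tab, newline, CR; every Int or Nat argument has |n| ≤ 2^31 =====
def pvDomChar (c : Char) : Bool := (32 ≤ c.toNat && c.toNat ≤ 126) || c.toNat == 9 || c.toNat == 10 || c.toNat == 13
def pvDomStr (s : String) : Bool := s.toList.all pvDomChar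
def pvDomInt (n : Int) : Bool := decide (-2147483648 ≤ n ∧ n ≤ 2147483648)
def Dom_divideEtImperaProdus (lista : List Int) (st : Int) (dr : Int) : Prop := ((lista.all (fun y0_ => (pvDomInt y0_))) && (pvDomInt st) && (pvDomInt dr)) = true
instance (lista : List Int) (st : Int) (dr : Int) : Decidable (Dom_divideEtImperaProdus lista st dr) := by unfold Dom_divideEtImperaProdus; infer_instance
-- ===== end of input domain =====

-- B replaces A's midpoint divide-and-conquer recursion with a single direct loop over
-- range(st, dr+1) multiplying the even-indexed elements into an accumulator (objective: simpler).

-- ===== PORT A =====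
-- literal transliteration of A's recursion; lista[i] is total pyGetD, exact under Pre_ (InRange)
def divideEtImperaProdus (lista : List Int) (st : Int) (dr : Int) : Int :=
  if st = dr ∧ PySem.Int.mod st 2 = 0 then
    PySem.List.pyGetD lista st 0
  else if h : st < dr then
    let mij := PySem.Int.floordiv (st + dr) 2
    let left := divideEtImperaProdus lista st mij
    let right := divideEtImperaProdus lista (mij + 1) dr
    left * right
  else
    1
termination_by (dr - st).toNat
decreasing_by
  · have hlt : PySem.Int.floordiv (st + dr) 2 < dr := by
      rw [PySem.Int.floordiv_lt_iff_lt_mul (by omega)]; omega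
    omega
  · have hb := PySem.Int.floordiv_two_mid_bounds (le_of_lt h)
    omega

-- ===== PORT B =====
-- literal transliteration of Source B: prod = 1; for i in range(st, dr+1): if i % 2 == 0: prod *= lista[i]
def divideEtImperaProdus_alt (lista : List Int) (st : Int) (dr : Int) : Int :=
  (PySem.List.pyRange st (dr + 1) 1).foldl
    (fun prod i => if PySem.Int.mod i 2 = 0 then prod * PySem.List.pyGetD lista i 0 else prod) 1

-- ===== PRECONDITION & SPEC =====
-- Pre_: exactly the inputs where Python A returns (every even index in [st,dr] is a valid
-- Python index of lista; otherwise lista[i] raises IndexError in both A and B).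
def Pre_divideEtImperaProdus (lista : List Int) (st : Int) (dr : Int) : Prop :=
  let lo := if PySem.Int.mod st 2 = 0 then st else st + 1   -- smallest even index in [st, dr]
  let hi := if PySem.Int.mod dr 2 = 0 then dr else dr - 1   -- largest even index in [st, dr]
  dr < lo ∨ (PySem.Raise.InRange lista.length lo ∧ PySem.Raise.InRange lista.length hi)
instance (lista : List Int) (st : Int) (dr : Int) : Decidable (Pre_divideEtImperaProdus lista st dr) := by unfold Pre_divideEtImperaProdus; infer_instance

def pvWitness_divideEtImperaProdus : List Int × Int × Int := ([2, 3, 5], 0, 2)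

def Spec_divideEtImperaProdus (lista : List Int) (st : Int) (dr : Int) (out : Int) : Prop := out = divideEtImperaProdus_alt lista st dr
instance (lista : List Int) (st : Int) (dr : Int) (out : Int) : Decidable (Spec_divideEtImperaProdus lista st dr out) := by unfold Spec_divideEtImperaProdus; infer_instance

-- ===== CLAIM (what is proved, stated in full; the proofs are below) =====
def Claim_equal_divideEtImperaProdus : Prop := ∀ (lista : List Int) (st : Int) (dr : Int), Dom_divideEtImperaProdus lista st dr → Pre_divideEtImperaProdus lista st dr → Spec_divideEtImperaProdus lista st dr (divideEtImperaProdus lista st dr)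

-- ===== LEMMAS AND PROOFS =====

-- the per-index factor both programs multiply in
def pvFac (lista : List Int) (i : Int) : Int :=
  if PySem.Int.mod i 2 = 0 then PySem.List.pyGetD lista i 0 else 1

theorem pvFoldl_fac (lista : List Int) (l : List Int) (init : Int) :
    l.foldl (fun prod i => if PySem.Int.mod i 2 = 0 then prod * PySem.List.pyGetD lista i 0 else prod) init
      = init * (l.map (pvFac lista)).prod := by
  induction l generalizing init with
  | nil => simp
  | cons x xs ih =>
    simp only [List.foldl_cons, List.map_cons, List.prod_cons, pvFac]
    split_ifs with h <;> rw [ih] <;> ring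

theorem pvA_eq_prod (lista : List Int) (st dr : Int) :
    divideEtImperaProdus lista st dr = ((PySem.List.pyRange st (dr + 1) 1).map (pvFac lista)).prod := by
  by_cases hlt : st < dr
  · have hb := PySem.Int.floordiv_two_mid_bounds (le_of_lt hlt)
    have hltm : PySem.Int.floordiv (st + dr) 2 < dr := by
      rw [PySem.Int.floordiv_lt_iff_lt_mul (by omega)]; omega
    rw [divideEtImperaProdus]
    simp only [if_neg (by omega : ¬ (st = dr ∧ PySem.Int.mod st 2 = 0)), dif_pos hlt]
    rw [pvA_eq_prod lista st (PySem.Int.floordiv (st + dr) 2),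
        pvA_eq_prod lista (PySem.Int.floordiv (st + dr) 2 + 1) dr,
        PySem.List.pyRange_one_append st (PySem.Int.floordiv (st + dr) 2 + 1) (dr + 1)
          (by omega) (by omega)]
    simp [List.prod_append]
  · by_cases he : st = dr
    · subst he
      rw [divideEtImperaProdus, PySem.List.pyRange_one_singleton]
      by_cases hev : PySem.Int.mod st 2 = 0
      · simp [pvFac]
      · simp only [dif_neg hlt]
        simp [pvFac]
    · rw [divideEtImperaProdus, PySem.List.pyRange_one_eq_nil (by omega)]
      simp only [if_neg (by tauto : ¬ (st = dr ∧ PySem.Int.mod st 2 = 0)), dif_neg hlt]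
      simp
termination_by (dr - st).toNat
decreasing_by
  · omega
  · omega

-- ===== VERDICT (by name: the statement is the Claim_ definition above) =====
theorem divideEtImperaProdus_spec : Claim_equal_divideEtImperaProdus := by
  intro lista st dr _ _
  unfold Spec_divideEtImperaProdus divideEtImperaProdus_alt
  rw [pvA_eq_prod, pvFoldl_fac]
  simp
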